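-- pv_equiv track=rewrite | github.com/AmitCharran/DataScienceProject1 | physicsProject/physicsProject.py | createY2
-- ===== SOURCE A (Python) =====
-- def createY2(listX, list1):
--     ans = []
--     for i in range(0, len(listX)):
--         ans.append(0)
--
--     for i in list1:
--         for j in range(0, len(listX)):
--             if int(i) < listX[j]:
--                 ans[j] = ans[j] + 1
--                 break
--     return ans
-- ===== SOURCE B (Python) =====
-- def createY2(listX, list1):
--     # "prefix records" of listX: positions whose value is strictly greater than
--     # every earlier value; their values are strictly increasing, so the first
--     # index of listX with value > i can be found by binary search over them.
--     recs = []  # list of (value, index), values strictly increasing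
--     j = 0
--     for v in listX:
--         if not recs or recs[-1][0] < v:
--             recs.append((v, j))
--         j += 1
--     ans = [0] * len(listX)
--     m = len(recs)
--     for i in list1:
--         lo, hi = 0, m
--         while lo < hi:
--             mid = (lo + hi) // 2
--             if i < recs[mid][0]:
--                 hi = mid
--             else:
--                 lo = mid + 1
--         if lo < m:
--             ans[recs[lo][1]] += 1
--     return ans
-- ===== Notes on version B (the rewrite author's own statement) =====
-- stated objective: faster
-- what changed: Replaces A's per-element linear scan of listX with a precomputed list of strictly-increasing 'prefix record' (value, index) pairs and a binary search over it, so each element of list1 is bucketed in O(log) instead of O(len(listX)).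
import Mathlib
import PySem

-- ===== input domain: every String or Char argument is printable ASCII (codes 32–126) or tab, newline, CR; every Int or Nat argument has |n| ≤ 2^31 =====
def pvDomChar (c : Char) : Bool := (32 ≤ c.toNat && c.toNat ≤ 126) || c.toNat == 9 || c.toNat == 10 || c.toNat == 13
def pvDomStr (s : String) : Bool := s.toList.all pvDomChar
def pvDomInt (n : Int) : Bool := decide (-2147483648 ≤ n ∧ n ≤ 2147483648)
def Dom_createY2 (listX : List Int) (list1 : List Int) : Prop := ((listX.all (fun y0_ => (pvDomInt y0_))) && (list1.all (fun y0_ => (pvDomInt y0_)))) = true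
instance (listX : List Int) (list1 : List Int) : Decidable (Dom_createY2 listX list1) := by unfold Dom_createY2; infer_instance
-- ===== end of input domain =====

-- B replaces A's per-element linear scan of listX by a binary search over the
-- strictly increasing "prefix record" positions of listX (objective: faster, asymptotic).


-- ===== PORT A =====
-- inner 'for j in range(0, len(listX)): if int(i) < listX[j]: ans[j] += 1; break'
-- (indices are provably in range, so getD is exact here)
def innerA (listX : List Int) (i : Int) (ans : List Int) (j : Nat) : List Int :=
  if _h : j < listX.length then
    if i < listX.getD j 0 then ans.set j (ans.getD j 0 + 1)
    else innerA listX i ans (j + 1)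
  else ans
termination_by listX.length - j

def createY2 (listX : List Int) (list1 : List Int) : List Int :=
  -- 'ans = []; for i in range(0, len(listX)): ans.append(0)'
  let ans := (List.range listX.length).foldl (fun a _ => a ++ [0]) []
  list1.foldl (fun a i => innerA listX i a 0) ans

-- ===== PORT B =====
-- 'for v in listX: if not recs or recs[-1][0] < v: recs.append((v, j)); j += 1'
def recsLoop (listX : List Int) (recs : List (Int × Nat)) (j : Nat) : List (Int × Nat) :=
  match listX with
  | [] => recs
  | v :: rest =>
    let recs' := match recs.getLast? with
      | none => recs ++ [(v, j)]
      | some p => if p.1 < v then recs ++ [(v, j)] else recs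
    recsLoop rest recs' (j + 1)

-- 'while lo < hi: mid = (lo+hi)//2; …'  (mid is provably in range, so getD is exact)
def bsearchB (recs : List (Int × Nat)) (i : Int) (lo hi : Nat) : Nat :=
  if lo < hi then
    let mid := (lo + hi) / 2
    if i < (recs.getD mid (0, 0)).1 then bsearchB recs i lo mid
    else bsearchB recs i (mid + 1) hi
  else lo
termination_by hi - lo

def createY2_alt (listX : List Int) (list1 : List Int) : List Int :=
  let recs := recsLoop listX [] 0
  let m := recs.length
  let ans := List.replicate listX.length 0
  list1.foldl (fun a i =>
    let lo := bsearchB recs i 0 m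
    if lo < m then
      let j := (recs.getD lo (0, 0)).2
      a.set j (a.getD j 0 + 1)
    else a) ans

-- ===== PRECONDITION & SPEC =====
def Spec_createY2 (listX : List Int) (list1 : List Int) (out : List Int) : Prop := out = createY2_alt listX list1
instance (listX : List Int) (list1 : List Int) (out : List Int) : Decidable (Spec_createY2 listX list1 out) := by unfold Spec_createY2; infer_instance

-- ===== CLAIM (what is proved, stated in full; the proofs are below) =====
def Claim_equal_createY2 : Prop := ∀ (listX : List Int) (list1 : List Int), Dom_createY2 listX list1 → Spec_createY2 listX list1 (createY2 listX list1)

-- ===== LEMMAS AND PROOFS =====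

-- the invariant of B's record-building loop after the first n elements of listX
def RecsInv (listX : List Int) (n : Nat) (recs : List (Int × Nat)) : Prop :=
  recs.Pairwise (fun p q => p.1 < q.1 ∧ p.2 < q.2) ∧
  (∀ p ∈ recs, p.2 < n ∧ listX.getD p.2 0 = p.1) ∧
  (∀ j, j < n → ∃ p ∈ recs, p.2 ≤ j ∧ listX.getD j 0 ≤ p.1)

theorem pairwise_le_getLast (recs : List (Int × Nat)) (lst : Int × Nat)
    (h : recs.Pairwise (fun p q => p.1 < q.1 ∧ p.2 < q.2))
    (hl : recs.getLast? = some lst) : ∀ q ∈ recs, q.1 ≤ lst.1 := by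
  induction recs with
  | nil => simp at hl
  | cons a rest ih =>
      cases rest with
      | nil =>
          simp at hl
          intro q hq; simp at hq; simp [hq, hl]
      | cons b rs =>
          rw [List.getLast?_cons_cons] at hl
          rcases List.pairwise_cons.mp h with ⟨ha, hrest⟩
          intro q hq
          rcases List.mem_cons.mp hq with rfl | hq'
          · have hlst : lst ∈ b :: rs := List.mem_of_getLast? hl
            exact le_of_lt (ha lst hlst).1
          · exact ih hrest hl q hq' 

theorem recsLoop_inv (listX : List Int) :
    ∀ n recs, n ≤ listX.length → RecsInv listX n recs →
      RecsInv listX listX.length (recsLoop (listX.drop n) recs n) := by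
  intro n recs hn hinv
  have hgen : ∀ d n recs, listX.length - n ≤ d → n ≤ listX.length → RecsInv listX n recs →
      RecsInv listX listX.length (recsLoop (listX.drop n) recs n) := by
    intro d
    induction d with
    | zero =>
        intro n recs hd hn hinv
        have hne : n = listX.length := by omega
        subst hne
        simp [recsLoop]
        exact hinv
    | succ d ih =>
        intro n recs hd hn hinv
        by_cases hlt : n < listX.length
        · rw [List.drop_eq_getElem_cons hlt, recsLoop]
          obtain ⟨h1, h2, h3⟩ := hinv
          have hgetD : listX.getD n 0 = listX[n] := List.getD_eq_getElem listX 0 hlt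
          have step : ∀ recs', (recs' = recs ++ [(listX[n], n)] ∨ recs' = recs) →
              RecsInv listX (n + 1) recs' → RecsInv listX listX.length (recsLoop (listX.drop (n+1)) recs' (n+1)) := by
            intro recs' _ hinv'
            exact ih (n+1) recs' (by omega) (by omega) hinv'
          cases hcase : recs.getLast? with
          | none =>
              dsimp only []
              have hrnil : recs = [] := List.getLast?_eq_none_iff.mp hcase
              subst hrnil
              have hn0 : n = 0 := by
                by_contra hne
                obtain ⟨p, hp, -⟩ := h3 0 (by omega)
                simp at hp
              subst hn0
              apply step _ (Or.inl rfl)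
              refine ⟨by simp, ?_, ?_⟩
              · intro p hp; simp at hp; subst hp
                exact ⟨by omega, hgetD⟩
              · intro j hj
                have : j = 0 := by omega
                subst this
                exact ⟨(listX[0], 0), by simp, by omega, by rw [hgetD]⟩
          | some p =>
              dsimp only []
              have hpmem : p ∈ recs := List.mem_of_getLast? hcase
              by_cases hv : p.1 < listX[n]
              · rw [if_pos hv]
                apply step _ (Or.inl rfl)
                refine ⟨?_, ?_, ?_⟩
                · rw [List.pairwise_append]
                  refine ⟨h1, by simp, ?_⟩
                  intro q hq x hx
                  simp at hx; subst hx
                  have hq1 : q.1 ≤ p.1 := pairwise_le_getLast recs p h1 hcase q hq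
                  exact ⟨by omega, (h2 q hq).1⟩
                · intro q hq
                  rcases List.mem_append.mp hq with hq' | hq'
                  · exact ⟨by have := (h2 q hq').1; omega, (h2 q hq').2⟩
                  · simp at hq'; subst hq'
                    exact ⟨by omega, hgetD⟩
                · intro j hj
                  by_cases hjn : j < n
                  · obtain ⟨q, hq, hle, hle2⟩ := h3 j hjn
                    exact ⟨q, List.mem_append.mpr (Or.inl hq), hle, hle2⟩
                  · have hjn' : j = n := by omega
                    exact ⟨(listX[n], n), List.mem_append.mpr (Or.inr (by simp)), by omega,
                      by rw [hjn', hgetD]⟩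
              · rw [if_neg hv]
                apply step _ (Or.inr rfl)
                refine ⟨h1, ?_, ?_⟩
                · intro q hq; exact ⟨by have := (h2 q hq).1; omega, (h2 q hq).2⟩
                · intro j hj
                  by_cases hjn : j < n
                  · exact h3 j hjn
                  · have hjn' : j = n := by omega
                    refine ⟨p, hpmem, by have := (h2 p hpmem).1; omega, ?_⟩
                    rw [hjn', hgetD]; omega
        · have hne : n = listX.length := by omega
          subst hne
          simp [recsLoop]
          exact hinv
  exact hgen listX.length n recs (by omega) hn hinv

theorem bsearchB_spec (R : List (Int × Nat)) (i : Int)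
    (hmono : ∀ a b, a ≤ b → b < R.length → (R.getD a (0,0)).1 ≤ (R.getD b (0,0)).1) :
    ∀ d lo hi, hi - lo ≤ d → lo ≤ hi → hi ≤ R.length →
      (∀ k, k < lo → (R.getD k (0,0)).1 ≤ i) →
      (∀ k, hi ≤ k → k < R.length → i < (R.getD k (0,0)).1) →
      bsearchB R i lo hi ≤ R.length ∧
      (∀ k, k < bsearchB R i lo hi → (R.getD k (0,0)).1 ≤ i) ∧
      (∀ k, bsearchB R i lo hi ≤ k → k < R.length → i < (R.getD k (0,0)).1) := by
  intro d
  induction d with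
  | zero =>
      intro lo hi hd hle hlen hlo hhi
      have : ¬ lo < hi := by omega
      rw [bsearchB, if_neg this]
      exact ⟨by omega, hlo, fun k hk hk2 => hhi k (by omega) hk2⟩
  | succ d ih =>
      intro lo hi hd hle hlen hlo hhi
      by_cases hlt : lo < hi
      · rw [bsearchB, if_pos hlt]
        simp only []
        by_cases hm : i < (R.getD ((lo + hi) / 2) (0,0)).1
        · rw [if_pos hm]
          apply ih lo ((lo + hi) / 2) (by omega) (by omega) (by omega) hlo
          intro k hk hk2
          exact lt_of_lt_of_le hm (hmono _ k hk hk2)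
        · rw [if_neg hm]
          apply ih ((lo + hi) / 2 + 1) hi (by omega) (by omega) hlen _ hhi
          intro k hk
          have hmid : (lo + hi) / 2 < R.length := by omega
          exact le_trans (hmono k _ (by omega) hmid) (by omega)
      · rw [bsearchB, if_neg hlt]
        exact ⟨by omega, fun k hk => hlo k (by omega), fun k hk hk2 => hhi k (by omega) hk2⟩

theorem innerA_hit (listX : List Int) (i : Int) (ans : List Int) (j : Nat)
    (hj : j < listX.length) (hgt : i < listX.getD j 0)
    (hb : ∀ k, k < j → listX.getD k 0 ≤ i) :
    ∀ s, s ≤ j → innerA listX i ans s = ans.set j (ans.getD j 0 + 1) := by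
  have hgen : ∀ d s, j - s ≤ d → s ≤ j → innerA listX i ans s = ans.set j (ans.getD j 0 + 1) := by
    intro d
    induction d with
    | zero =>
        intro s hd hs
        have : s = j := by omega
        subst this
        rw [innerA, dif_pos hj, if_pos hgt]
    | succ d ih =>
        intro s hd hs
        by_cases hsj : s = j
        · subst hsj
          rw [innerA, dif_pos hj, if_pos hgt]
        · have hlt : s < j := by omega
          rw [innerA, dif_pos (by omega), if_neg (by have := hb s hlt; omega)]
          exact ih (s + 1) (by omega) (by omega)
  intro s hs
  exact hgen j s (by omega) hs

theorem innerA_miss (listX : List Int) (i : Int) (ans : List Int)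
    (hb : ∀ k, k < listX.length → listX.getD k 0 ≤ i) :
    ∀ s, innerA listX i ans s = ans := by
  have hgen : ∀ d s, listX.length - s ≤ d → innerA listX i ans s = ans := by
    intro d
    induction d with
    | zero =>
        intro s hd
        rw [innerA, dif_neg (by omega)]
    | succ d ih =>
        intro s hd
        by_cases hs : s < listX.length
        · rw [innerA, dif_pos hs, if_neg (by have := hb s hs; omega)]
          exact ih (s + 1) (by omega)
        · rw [innerA, dif_neg hs]
  intro s
  exact hgen (listX.length - s) s (by omega)

theorem step_eq (listX : List Int) (i : Int) (ans : List Int) :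
    innerA listX i ans 0 =
      (let recs := recsLoop listX [] 0
       let lo := bsearchB recs i 0 recs.length
       if lo < recs.length then
         let j := (recs.getD lo (0, 0)).2
         ans.set j (ans.getD j 0 + 1)
       else ans) := by
  simp only []
  set R := recsLoop listX [] 0 with hR
  have hinv : RecsInv listX listX.length R := by
    have h0 : RecsInv listX 0 [] := ⟨by simp, by simp, by omega⟩
    have := recsLoop_inv listX 0 [] (by omega) h0
    simpa using this
  obtain ⟨h1, h2, h3⟩ := hinv
  have hmono : ∀ a b, a ≤ b → b < R.length → (R.getD a (0,0)).1 ≤ (R.getD b (0,0)).1 := by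
    intro a b hab hb
    rcases Nat.lt_or_ge a b with h | h
    · have := (List.pairwise_iff_getElem.mp h1) a b (by omega) hb h
      rw [List.getD_eq_getElem R (0,0) (by omega), List.getD_eq_getElem R (0,0) hb]
      exact le_of_lt this.1
    · have : a = b := by omega
      subst this; exact le_refl _
  obtain ⟨hrle, hA, hB⟩ := bsearchB_spec R i hmono R.length 0 R.length (by omega) (by omega)
    (by omega) (by omega) (by omega)
  set r := bsearchB R i 0 R.length with hr
  by_cases hrl : r < R.length
  · rw [if_pos hrl]
    have hgel : R.getD r (0,0) = R[r] := List.getD_eq_getElem R (0,0) hrl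
    have hmem : R.getD r (0,0) ∈ R := by rw [hgel]; exact List.getElem_mem hrl
    obtain ⟨hplen, hpval⟩ := h2 _ hmem
    have hgt : i < listX.getD (R.getD r (0,0)).2 0 := by
      rw [hpval]; exact hB r (le_refl r) hrl
    have hb : ∀ k, k < (R.getD r (0,0)).2 → listX.getD k 0 ≤ i := by
      intro k hk
      obtain ⟨q, hq, hq2, hq3⟩ := h3 k (by omega)
      obtain ⟨k', hk', hqe⟩ := List.mem_iff_getElem.mp hq
      have hk'r : k' < r := by
        rcases Nat.lt_or_ge k' r with h | h
        · exact h
        exfalso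
        rcases Nat.eq_or_lt_of_le h with h' | h'
        · subst h'
          have hq2' := congrArg Prod.snd (hgel.trans hqe)
          omega
        · have hp := (List.pairwise_iff_getElem.mp h1) r k' hrl hk' h'
          rw [hqe] at hp
          have hq2' : (R.getD r (0,0)).2 = (R[r]).2 := by rw [hgel]
          omega
      have : q.1 ≤ i := by
        have := hA k' hk'r
        rw [List.getD_eq_getElem R (0,0) hk', hqe] at this
        exact this
      omega
    exact innerA_hit listX i ans (R.getD r (0,0)).2 hplen hgt hb 0 (by omega)
  · rw [if_neg hrl]
    apply innerA_miss
    intro k hk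
    obtain ⟨q, hq, hq2, hq3⟩ := h3 k hk
    obtain ⟨k', hk', hqe⟩ := List.mem_iff_getElem.mp hq
    have : q.1 ≤ i := by
      have := hA k' (by omega)
      rw [List.getD_eq_getElem R (0,0) hk', hqe] at this
      exact this
    omega

theorem init_eq (n : Nat) :
    (List.range n).foldl (fun a _ => a ++ [0]) [] = List.replicate n (0 : Int) := by
  induction n with
  | zero => simp
  | succ n ih =>
      rw [List.range_succ, List.foldl_append, ih]
      simp [List.replicate_succ']

-- ===== VERDICT (by name: the statement is the Claim_ definition above) =====
theorem createY2_spec : Claim_equal_createY2 := by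
  intro listX list1 _
  unfold Spec_createY2 createY2 createY2_alt
  simp only []
  rw [init_eq]
  congr 1
  funext a i
  exact step_eq listX i a
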